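-- pv_equiv track=rewrite | github.com/puga-42/Are-we-fixing-our-dammed-rivers | src/helpers.py | solvability
-- ===== SOURCE A (Python) =====
-- def solvability(most_potent_dict, treatable):
--     '''
--         returns a list: [number of pollutants solvable with TMDLS,
--         number of pollutants not solvable with TMDLS]
--
--         ARGS:
--             most_potent_dict - dictionary with keys = pollutants, values = counts
--             treatable - dictionary with values = pollutants, values = 'Yes" or 'No'
--
--         Returns:
--             list - [number of pollutants solvable, number not solvable]
--     '''
--
--     solvable = 0
--     unsolvable = 0
--     for k, v in most_potent_dict.items():
--         if treatable[k] == 'Yes':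
--             solvable += v
--         else:
--             unsolvable += v
--     return [solvable, unsolvable]
-- ===== SOURCE B (Python) =====
-- def solvability(most_potent_dict, treatable):
--     # Group counts into buckets keyed by the treatability label, then read the
--     # answer off the buckets: 'Yes' bucket vs the sum of all other buckets.
--     buckets = {}
--     for pollutant, count in most_potent_dict.items():
--         label = treatable[pollutant]
--         buckets[label] = buckets.get(label, 0) + count
--     return [buckets.get('Yes', 0),
--             sum(c for label, c in buckets.items() if label != 'Yes')]
-- ===== Notes on version B (the rewrite author's own statement) =====
-- stated objective: alternative
-- what changed: B builds an intermediate grouping dict (a weighted counter keyed by each pollutant's treatability label) in one pass and then reads the result off the buckets ('Yes' bucket vs sum of the other buckets), instead of A's branching loop with two scalar accumulators.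
import Mathlib
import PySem

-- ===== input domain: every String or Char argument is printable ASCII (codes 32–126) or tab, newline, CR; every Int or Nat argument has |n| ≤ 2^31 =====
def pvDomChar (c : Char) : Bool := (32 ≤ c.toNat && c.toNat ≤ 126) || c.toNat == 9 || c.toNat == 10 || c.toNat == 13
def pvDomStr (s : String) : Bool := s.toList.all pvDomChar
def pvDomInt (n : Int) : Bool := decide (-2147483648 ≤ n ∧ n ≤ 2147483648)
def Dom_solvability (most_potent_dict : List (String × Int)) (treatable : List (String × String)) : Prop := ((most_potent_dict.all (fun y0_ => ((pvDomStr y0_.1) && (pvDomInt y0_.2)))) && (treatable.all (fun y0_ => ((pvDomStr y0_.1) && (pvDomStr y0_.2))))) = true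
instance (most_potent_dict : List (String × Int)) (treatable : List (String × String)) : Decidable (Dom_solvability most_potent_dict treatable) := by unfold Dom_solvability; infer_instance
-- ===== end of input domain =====

-- B groups the counts into a dict of buckets keyed by the treatability label and
-- reads the answer off the buckets, instead of A's branching two-accumulator loop.

-- ===== PORT A =====
-- A: two accumulators over dict items; treatable[k] is a dict lookup (KeyError excluded by Pre_,
-- where the lookup is ported as get? with a dummy default never reached inside Pre_).
def solvability (most_potent_dict : List (String × Int)) (treatable : List (String × String)) : List Int :=
  let td := PySem.Dict.ofList treatable
  let p := (PySem.Dict.ofList most_potent_dict).items.foldl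
    (fun (s : Int × Int) kv =>
      if (td.get? kv.1).getD "" == "Yes" then (s.1 + kv.2, s.2) else (s.1, s.2 + kv.2))
    (0, 0)
  [p.1, p.2]

-- ===== PORT B =====
-- B: one pass builds buckets[label] += count; answer = [buckets.get('Yes',0), sum of non-'Yes' buckets].
def solvability_alt (most_potent_dict : List (String × Int)) (treatable : List (String × String)) : List Int :=
  let td := PySem.Dict.ofList treatable
  let buckets := (PySem.Dict.ofList most_potent_dict).items.foldl
    (fun (d : PySem.Dict String Int) kv =>
      let label := (td.get? kv.1).getD ""
      d.insert label (d.getD label 0 + kv.2))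
    PySem.Dict.empty
  [buckets.getD "Yes" 0,
   ((buckets.items.filter (fun p => !(p.1 == "Yes"))).map Prod.snd).sum]

-- ===== PRECONDITION & SPEC =====
-- Pre_ excludes exactly the inputs where Python A raises KeyError: a pollutant key missing from treatable.
def Pre_solvability (most_potent_dict : List (String × Int)) (treatable : List (String × String)) : Prop :=
  most_potent_dict.all (fun kv => (PySem.Dict.ofList treatable).contains kv.1) = true
instance (most_potent_dict : List (String × Int)) (treatable : List (String × String)) : Decidable (Pre_solvability most_potent_dict treatable) := by unfold Pre_solvability; infer_instance

def pvWitness_solvability : (List (String × Int)) × (List (String × String)) :=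
  ([("lead", 3), ("zinc", 2)], [("lead", "Yes"), ("zinc", "No")])

def Spec_solvability (most_potent_dict : List (String × Int)) (treatable : List (String × String)) (out : List Int) : Prop := out = solvability_alt most_potent_dict treatable
instance (most_potent_dict : List (String × Int)) (treatable : List (String × String)) (out : List Int) : Decidable (Spec_solvability most_potent_dict treatable out) := by unfold Spec_solvability; infer_instance

-- ===== CLAIM (what is proved, stated in full; the proofs are below) =====
def Claim_equal_solvability : Prop := ∀ (most_potent_dict : List (String × Int)) (treatable : List (String × String)), Dom_solvability most_potent_dict treatable → Pre_solvability most_potent_dict treatable → Spec_solvability most_potent_dict treatable (solvability most_potent_dict treatable)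

-- ===== LEMMAS AND PROOFS =====

-- sum of the non-'Yes' buckets of a dict's items
def nonYesSum (l : List (String × Int)) : Int :=
  ((l.filter (fun p => !(p.1 == "Yes"))).map Prod.snd).sum

-- A's partition loop, with generalized accumulators: (init1 + yes-sum, init2 + non-yes-sum).
lemma solvability_fold (td : PySem.Dict String String) (l : List (String × Int)) (a b : Int) :
    l.foldl (fun (s : Int × Int) kv =>
      if (td.get? kv.1).getD "" == "Yes" then (s.1 + kv.2, s.2) else (s.1, s.2 + kv.2)) (a, b)
    = (a + ((l.filter (fun kv => (td.get? kv.1).getD "" == "Yes")).map Prod.snd).sum,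
       b + ((l.filter (fun kv => !((td.get? kv.1).getD "" == "Yes"))).map Prod.snd).sum) := by
  induction l generalizing a b with
  | nil => simp
  | cons kv rest ih =>
    simp only [List.foldl_cons]
    by_cases h : ((td.get? kv.1).getD "" == "Yes") = true
    · rw [if_pos h, ih]
      simp only [List.filter_cons, h, Bool.not_true, Bool.false_eq_true, if_false, if_true,
        List.map_cons, List.sum_cons, Prod.mk.injEq]
      exact ⟨by ring, trivial⟩
    · rw [if_neg h, ih]
      simp only [List.filter_cons, eq_false_of_ne_true h, Bool.not_false, Bool.false_eq_true,
        if_false, if_true, List.map_cons, List.sum_cons, Prod.mk.injEq]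
      exact ⟨trivial, by ring⟩

-- replacing the (unique) entry with key k by (k, w) changes nonYesSum by w - old, unless k = "Yes"
lemma nonYesSum_replace (l : List (String × Int)) (k : String) (old w : Int)
    (hnd : (l.map Prod.fst).Nodup) (hm : (k, old) ∈ l) :
    nonYesSum (l.map (fun p => if p.1 == k then (k, w) else p))
      = nonYesSum l + (if k == "Yes" then 0 else w - old) := by
  induction l with
  | nil => simp at hm
  | cons q rest ih =>
    simp only [List.map_cons, List.nodup_cons] at hnd
    by_cases hq : (q.1 == k) = true
    · have hqk : q.1 = k := by simpa using hq
      have hrest : rest.map (fun p => if p.1 == k then (k, w) else p) = rest := by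
        refine (List.map_congr_left ?_).trans (List.map_id rest)
        intro p hp
        have hpk : p.1 ≠ k := by
          intro hpk
          apply hnd.1
          rw [hqk, ← hpk]
          exact List.mem_map_of_mem hp
        simp [hpk]
      have hold : old = q.2 := by
        rcases List.mem_cons.mp hm with h | h
        · rw [← h]
        · exfalso
          apply hnd.1
          rw [hqk]
          exact List.mem_map_of_mem (f := Prod.fst) h
      simp only [List.map_cons, hq, if_true, hrest]
      by_cases hy : (k == "Yes") = true
      · have hqy : (q.1 == "Yes") = true := by rw [hqk]; exact hy
        simp [nonYesSum, hy, hqy]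
      · have hqy : (q.1 == "Yes") = false := by rw [hqk]; simpa using hy
        simp only [nonYesSum, List.filter_cons, hy, hqy, Bool.not_false, if_true,
          Bool.false_eq_true, if_false, List.map_cons, List.sum_cons]
        rw [hold]
        ring
    · have hq' : q.1 ≠ k := by simpa using hq
      have hm' : (k, old) ∈ rest := by
        rcases List.mem_cons.mp hm with h | h
        · exact absurd (congrArg Prod.fst h).symm hq'
        · exact h
      simp only [List.map_cons, hq, Bool.false_eq_true, if_false]
      by_cases hqy : (q.1 == "Yes") = true
      · simp only [nonYesSum, List.filter_cons, hqy, Bool.not_true, Bool.false_eq_true,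
          if_false] at *
        exact ih hnd.2 hm'
      · simp only [nonYesSum, List.filter_cons, eq_false_of_ne_true hqy, Bool.not_false, if_true,
          List.map_cons, List.sum_cons] at *
        rw [ih hnd.2 hm']
        ring

-- one bucket update: nonYesSum grows by v unless the label is "Yes"
lemma nonYesSum_insert (d : PySem.Dict String Int) (k : String) (v : Int)
    (hnd : d.keys.Nodup) :
    nonYesSum (d.insert k (d.getD k 0 + v)).items
      = nonYesSum d.items + (if k == "Yes" then 0 else v) := by
  by_cases hc : d.contains k = true
  · cases hget : d.get? k with
    | none =>
      rw [PySem.Dict.contains_eq_isSome_get?, hget] at hc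
      simp at hc
    | some old =>
      have hmem : (k, old) ∈ d.items := PySem.Dict.mem_items_of_get?_eq_some d hget
      have hgd : d.getD k 0 = old := PySem.Dict.getD_of_get?_eq_some d 0 hget
      rw [PySem.Dict.items_insert, if_pos hc, hgd,
        nonYesSum_replace d.items k old (old + v) hnd hmem]
      by_cases hy : (k == "Yes") = true
      · simp [hy]
      · simp only [hy, Bool.false_eq_true, if_false]
        ring
  · rw [PySem.Dict.items_insert, if_neg hc]
    simp only [nonYesSum, List.filter_append, List.map_append, List.sum_append,
      List.filter_cons, List.filter_nil]
    rw [PySem.Dict.getD_of_not_contains d 0 (by simpa using hc)]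
    by_cases hy : (k == "Yes") = true
    · simp [hy]
    · simp [hy]

-- invariant for B's grouping fold: the "Yes" bucket and the non-"Yes" total
lemma buckets_invariant (td : PySem.Dict String String) (l : List (String × Int))
    (d : PySem.Dict String Int) (hnd : d.keys.Nodup) :
    (l.foldl (fun (d : PySem.Dict String Int) kv =>
        d.insert ((td.get? kv.1).getD "") (d.getD ((td.get? kv.1).getD "") 0 + kv.2)) d).getD "Yes" 0
      = d.getD "Yes" 0 + ((l.filter (fun kv => (td.get? kv.1).getD "" == "Yes")).map Prod.snd).sum
    ∧ nonYesSum (l.foldl (fun (d : PySem.Dict String Int) kv =>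
        d.insert ((td.get? kv.1).getD "") (d.getD ((td.get? kv.1).getD "") 0 + kv.2)) d).items
      = nonYesSum d.items + ((l.filter (fun kv => !((td.get? kv.1).getD "" == "Yes"))).map Prod.snd).sum := by
  induction l generalizing d with
  | nil => simp
  | cons kv rest ih =>
    have hnd' : (d.insert ((td.get? kv.1).getD "") (d.getD ((td.get? kv.1).getD "") 0 + kv.2)).keys.Nodup :=
      PySem.Dict.nodup_keys_insert _ _ _ hnd
    obtain ⟨ih1, ih2⟩ := ih _ hnd'
    simp only [List.foldl_cons, List.filter_cons]
    constructor
    · rw [ih1, PySem.Dict.getD_insert]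
      by_cases hy : ((td.get? kv.1).getD "" == "Yes") = true
      · have hlab : (td.get? kv.1).getD "" = "Yes" := by simpa using hy
        simp only [hlab, beq_self_eq_true, if_true, List.map_cons, List.sum_cons]
        ring
      · have hne : ("Yes" : String) ≠ (td.get? kv.1).getD "" := by
          intro h
          exact hy (by simp [← h])
        simp [hy, hne]
    · rw [ih2, nonYesSum_insert _ _ _ hnd]
      by_cases hy : ((td.get? kv.1).getD "" == "Yes") = true
      · simp [hy]
      · simp only [hy, Bool.false_eq_true, if_false, Bool.not_false,
          if_true, List.map_cons, List.sum_cons]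
        ring

theorem solvability_eq (most_potent_dict : List (String × Int)) (treatable : List (String × String)) :
    solvability most_potent_dict treatable = solvability_alt most_potent_dict treatable := by
  show ([((PySem.Dict.ofList most_potent_dict).items.foldl
      (fun (s : Int × Int) kv =>
        if ((PySem.Dict.ofList treatable).get? kv.1).getD "" == "Yes" then (s.1 + kv.2, s.2)
        else (s.1, s.2 + kv.2)) (0, 0)).1, _] : List Int) = _
  rw [solvability_fold]
  obtain ⟨h1, h2⟩ := buckets_invariant (PySem.Dict.ofList treatable)
    (PySem.Dict.ofList most_potent_dict).items PySem.Dict.empty PySem.Dict.nodup_keys_empty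
  simp only [solvability_alt, nonYesSum] at *
  rw [h1, h2]
  simp [PySem.Dict.empty, PySem.Dict.getD, PySem.Dict.get?]

-- ===== VERDICT (by name: the statement is the Claim_ definition above) =====
theorem solvability_spec : Claim_equal_solvability := by
  intro m t _ _
  exact solvability_eq m t
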